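-- pv_equiv track=rewrite | github.com/SynthAIr/syntabair | src/syntabair/evaluation/privacy/common.py | closest_neighbors
-- ===== SOURCE A (Python) =====
-- def hamming_distance(target, test):
--     """Calculate the hamming distance between two tuples.
--
--     Arguments:
--         target (tuple):
--             The target tuple.
--         test (tuple):
--             The test tuple. Must have same length as target
--
--     Returns:
--         int:
--             The hamming distance
--     """
--     dist = 0
--     assert len(target) == len(test), (
--         'Tuples must have the same length in the calculation of hamming distance!'
--     )
--
--     for target_entry, test_entry in zip(target, test):
--         if target_entry != test_entry:
--             dist += 1
--
--     return dist
--
-- def closest_neighbors(samples, target):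
--     """Find elements in a given list that are closest to a given element in hamming distance.
--
--     Arguments:
--         samples (iterable[tuple]):
--             The given list to look up for.
--         target (tuple):
--             The target tuple.
--
--     Returns:
--         list [tuple]:
--             Elements in samples that are closest to target.
--     """
--     dist = float('inf')
--     ret = []
--     for element in samples:
--         hamming_dist = hamming_distance(target, element)
--         if hamming_dist < dist:
--             dist = hamming_dist
--             ret = [
--                 element,
--             ]
--         elif hamming_dist == dist:
--             ret.append(element)
--
--     return ret
-- ===== SOURCE B (Python) =====
-- def _distance(target, s):
--     """Hamming distance; the tuples must have the same length."""
--     assert len(target) == len(s), (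
--         'Tuples must have the same length in the calculation of hamming distance!'
--     )
--     return sum(1 for a, b in zip(target, s) if a != b)
--
--
-- def closest_neighbors(samples, target):
--     """Find elements in samples closest to target in Hamming distance.
--
--     Two-pass decomposition: compute every distance once, take the minimum,
--     then filter — instead of A's incremental running-minimum scan with
--     tie-reset.
--     """
--     samples = list(samples)
--     if not samples:
--         return []
--     dists = [_distance(target, s) for s in samples]
--     m = min(dists)
--     return [s for s, d in zip(samples, dists) if d == m]
-- ===== Notes on version B (the rewrite author's own statement) =====
-- stated objective: simpler
-- what changed: Replaces A's single incremental scan with a running minimum and tie-reset list by a two-pass decomposition: compute all Hamming distances once, take min(dists), then filter the samples whose distance equals it.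
import Mathlib
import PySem

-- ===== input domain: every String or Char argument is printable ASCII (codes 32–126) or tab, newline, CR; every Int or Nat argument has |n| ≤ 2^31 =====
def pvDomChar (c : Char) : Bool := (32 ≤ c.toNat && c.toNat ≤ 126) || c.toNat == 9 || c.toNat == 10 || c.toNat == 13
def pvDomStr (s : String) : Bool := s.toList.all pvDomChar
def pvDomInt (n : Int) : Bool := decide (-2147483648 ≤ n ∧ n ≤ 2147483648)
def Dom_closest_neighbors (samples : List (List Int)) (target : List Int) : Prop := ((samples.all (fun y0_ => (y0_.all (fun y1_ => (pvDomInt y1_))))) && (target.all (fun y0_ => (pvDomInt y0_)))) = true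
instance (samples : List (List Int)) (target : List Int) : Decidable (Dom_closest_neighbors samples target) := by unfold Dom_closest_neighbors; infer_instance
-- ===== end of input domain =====

-- B replaces A's one-pass running-minimum scan (with tie reset) by a two-pass
-- decomposition: compute every Hamming distance, take the minimum, filter.
-- Same cost; objective: simpler.

-- ===== PORT A =====
def hamming_distance (target test : List Int) : Int :=
  (target.zip test).foldl (fun dist p => if p.1 ≠ p.2 then dist + 1 else dist) 0

def closestLoopA (target : List Int) (dist : Option Int) (ret : List (List Int)) :
    List (List Int) → List (List Int)
  | [] => ret
  | element :: rest =>
    let h := hamming_distance target element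
    match dist with
    | none => closestLoopA target (some h) [element] rest
    | some d =>
      if h < d then closestLoopA target (some h) [element] rest
      else if h = d then closestLoopA target (some d) (ret ++ [element]) rest
      else closestLoopA target (some d) ret rest

def closest_neighbors (samples : List (List Int)) (target : List Int) : List (List Int) :=
  closestLoopA target none [] samples

-- ===== PORT B =====
-- _distance: same-length assert (its failure is excluded by Pre_), then
-- sum(1 for a, b in zip(target, s) if a != b)
def cnDist (target s : List Int) : Int :=
  ((target.zip s).countP (fun p => p.1 != p.2) : Nat)

def closest_neighbors_alt (samples : List (List Int)) (target : List Int) : List (List Int) :=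
  if samples = [] then []
  else
    let dists := samples.map (fun s => cnDist target s)
    match PySem.List.min? dists (fun x => x) with
    | none => []   -- unreachable: samples ≠ [], so dists ≠ []
    | some m => ((samples.zip dists).filter (fun p => p.2 = m)).map Prod.fst

-- ===== PRECONDITION & SPEC =====
-- A's hamming_distance asserts equal tuple lengths, so A raises AssertionError
-- whenever some sample's length differs from target's; Pre_ excludes exactly those.
def Pre_closest_neighbors (samples : List (List Int)) (target : List Int) : Prop :=
  ∀ s ∈ samples, s.length = target.length
instance (samples : List (List Int)) (target : List Int) : Decidable (Pre_closest_neighbors samples target) := by unfold Pre_closest_neighbors; infer_instance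
def pvWitness_closest_neighbors : List (List Int) × List Int := ([[0, 1], [1, 1], [0, 0]], [0, 0])

def Spec_closest_neighbors (samples : List (List Int)) (target : List Int) (out : List (List Int)) : Prop := out = closest_neighbors_alt samples target
instance (samples : List (List Int)) (target : List Int) (out : List (List Int)) : Decidable (Spec_closest_neighbors samples target out) := by unfold Spec_closest_neighbors; infer_instance

-- ===== CLAIM (what is proved, stated in full; the proofs are below) =====
def Claim_equal_closest_neighbors : Prop := ∀ (samples : List (List Int)) (target : List Int), Dom_closest_neighbors samples target → Pre_closest_neighbors samples target → Spec_closest_neighbors samples target (closest_neighbors samples target)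


-- ===== LEMMAS AND PROOFS =====

-- B's count of mismatches equals A's fold-accumulated hamming distance.
theorem cnDist_eq_hamming (target s : List Int) :
    cnDist target s = hamming_distance target s := by
  unfold cnDist hamming_distance
  rw [show (fun (dist : Int) (p : Int × Int) => if p.1 ≠ p.2 then dist + 1 else dist)
        = (fun (dist : Int) (p : Int × Int) => if (p.1 != p.2) = true then dist + 1 else dist) by
      funext d p; simp]
  rw [PySem.List.foldl_count_if (fun p : Int × Int => p.1 != p.2) (target.zip s) 0]
  simp

-- Characterisation of A's loop from a state (some d, ret).
theorem closestLoopA_some (target : List Int) (rest : List (List Int)) :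
    ∀ (d : Int) (ret : List (List Int)),
      closestLoopA target (some d) ret rest =
        (if (rest.map (hamming_distance target)).foldl min d = d then ret else []) ++
          rest.filter (fun s => hamming_distance target s =
            (rest.map (hamming_distance target)).foldl min d) := by
  induction rest with
  | nil => intro d ret; simp [closestLoopA]
  | cons s rest ih =>
    intro d ret
    have hmle := PySem.List.foldl_min_le (rest.map (hamming_distance target))
      (min d (hamming_distance target s))
    simp only [closestLoopA, List.map_cons, List.foldl_cons, List.filter_cons]
    by_cases h1 : hamming_distance target s < d
    · rw [if_pos h1, ih]
      have hmin : min d (hamming_distance target s) = hamming_distance target s := by omega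
      rw [hmin] at hmle; simp only [hmin]
      have hne : ¬ ((rest.map (hamming_distance target)).foldl min (hamming_distance target s) = d) := by
        omega
      rw [if_neg hne]
      by_cases h2 : (rest.map (hamming_distance target)).foldl min (hamming_distance target s)
          = hamming_distance target s
      · simp [h2]
      · have h2' : ¬ (hamming_distance target s
            = (rest.map (hamming_distance target)).foldl min (hamming_distance target s)) :=
          fun hh => h2 hh.symm
        simp [h2, h2']
    · rw [if_neg h1]
      by_cases h2 : hamming_distance target s = d
      · rw [if_pos h2, ih]
        have hmin : min d (hamming_distance target s) = d := by omega
        rw [hmin] at hmle; simp only [hmin]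
        by_cases h3 : (rest.map (hamming_distance target)).foldl min d = d
        · have h3' : hamming_distance target s
              = (rest.map (hamming_distance target)).foldl min d := by rw [h2, h3]
          simp [h3, h3']
        · have h3' : ¬ (hamming_distance target s
              = (rest.map (hamming_distance target)).foldl min d) := by
            rw [h2]; exact fun hh => h3 hh.symm
          simp [h3, h3']
      · rw [if_neg h2, ih]
        have hmin : min d (hamming_distance target s) = d := by omega
        rw [hmin] at hmle; simp only [hmin]
        have h3' : ¬ (hamming_distance target s
            = (rest.map (hamming_distance target)).foldl min d) := by omega
        simp [h3']

-- Filtering the (sample, distance) zip by distance and projecting = filtering samples.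
theorem zip_map_filter_fst {α : Type} (f : α → Int) (m : Int) (xs : List α) :
    (((xs.zip (xs.map f)).filter (fun p => p.2 = m)).map Prod.fst) =
      xs.filter (fun s => f s = m) := by
  induction xs with
  | nil => simp
  | cons x xs ih =>
    simp only [List.map_cons, List.zip_cons_cons, List.filter_cons]
    by_cases h : f x = m
    · simp [h, ih]
    · simp [h, ih]

-- ===== VERDICT (by name: the statement is the Claim_ definition above) =====
theorem closest_neighbors_spec : Claim_equal_closest_neighbors := by
  intro samples target _ _
  unfold Spec_closest_neighbors closest_neighbors closest_neighbors_alt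
  cases samples with
  | nil => simp [closestLoopA]
  | cons s rest =>
    have hmap : List.map (fun t => cnDist target t) (s :: rest)
        = List.map (hamming_distance target) (s :: rest) := by
      simp [cnDist_eq_hamming]
    simp only [closestLoopA]
    rw [if_neg (List.cons_ne_nil s rest), hmap,
      closestLoopA_some target rest (hamming_distance target s) [s]]
    simp only [List.map_cons, PySem.List.min?_id_cons]
    simp only [← List.map_cons]
    rw [zip_map_filter_fst (hamming_distance target)
        ((rest.map (hamming_distance target)).foldl min (hamming_distance target s)) (s :: rest),
      List.filter_cons]
    by_cases h : hamming_distance target s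
        = (rest.map (hamming_distance target)).foldl min (hamming_distance target s)
    · simp [h.symm]
    · have h' : ¬ ((rest.map (hamming_distance target)).foldl min (hamming_distance target s)
          = hamming_distance target s) := fun hh => h hh.symm
      simp [h, h']
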